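-- pv_equiv track=rewrite | github.com/xizerlix/trust_tunnel_rock | .github/scripts/download_core.py | find_asset
-- ===== SOURCE A (Python) =====
-- def find_asset(assets, platform_keyword, arch_candidates):
--     p = platform_keyword.lower()
--     archs = [a.lower() for a in arch_candidates]
--     for a in assets:
--         name = a.get('name','').lower()
--         if p in name and any(arch in name for arch in archs):
--             return a
--     for a in assets:
--         name = a.get('name','').lower()
--         if p in name:
--             return a
--     return None
-- ===== SOURCE B (Python) =====
-- def find_asset(assets, platform_keyword, arch_candidates):
--     p = platform_keyword.lower()
--     archs = [a.lower() for a in arch_candidates]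
--     fallback = None
--     for a in assets:
--         name = a.get('name', '').lower()
--         if p in name:
--             if any(arch in name for arch in archs):
--                 return a
--             if fallback is None:
--                 fallback = a
--     return fallback
-- ===== Notes on version B (the rewrite author's own statement) =====
-- stated objective: simpler
-- what changed: Replaces A's two full scans over assets with a single pass that returns immediately on a platform+arch match and records the first platform-only asset as a fallback returned after the loop.
import Mathlib
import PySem

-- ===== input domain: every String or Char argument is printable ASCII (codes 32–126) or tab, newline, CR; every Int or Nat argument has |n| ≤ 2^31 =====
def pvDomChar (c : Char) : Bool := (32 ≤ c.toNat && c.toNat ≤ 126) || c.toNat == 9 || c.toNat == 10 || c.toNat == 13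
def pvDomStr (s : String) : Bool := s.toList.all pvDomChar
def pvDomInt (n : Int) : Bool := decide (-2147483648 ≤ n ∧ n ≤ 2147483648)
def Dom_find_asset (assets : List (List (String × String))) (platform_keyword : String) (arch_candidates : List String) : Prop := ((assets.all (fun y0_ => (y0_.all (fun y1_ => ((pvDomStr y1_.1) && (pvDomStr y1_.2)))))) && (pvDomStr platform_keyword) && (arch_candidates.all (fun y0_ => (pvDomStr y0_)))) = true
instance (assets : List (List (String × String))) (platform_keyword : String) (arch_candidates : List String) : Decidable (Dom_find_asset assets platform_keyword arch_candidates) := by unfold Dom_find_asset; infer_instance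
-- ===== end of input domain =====

-- B does one pass with an early return and a first-platform-only fallback instead of A's two scans; return value only, no side effects.

-- ===== PORT A =====
-- a.get('name','').lower()
def pvNameOf (a : List (String × String)) : String :=
  PySem.Str.lower ((PySem.Dict.mk a).getD "name" "")

def find_asset (assets : List (List (String × String))) (platform_keyword : String) (arch_candidates : List String) : Option (List (String × String)) :=
  let p := PySem.Str.lower platform_keyword
  let archs := arch_candidates.map PySem.Str.lower
  -- first loop: platform and any arch
  match assets.find? (fun a =>
      let name := pvNameOf a
      PySem.Str.isIn p name && archs.any (fun arch => PySem.Str.isIn arch name)) with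
  | some a => some a
  | none =>
    -- second loop: platform only
    match assets.find? (fun a => PySem.Str.isIn p (pvNameOf a)) with
    | some a => some a
    | none => none

-- ===== PORT B =====
-- the single loop of Source B, fallback threaded as an accumulator
def pvGo (p : String) (archs : List String) : List (List (String × String)) → Option (List (String × String)) → Option (List (String × String))
  | [], fallback => fallback
  | a :: rest, fallback =>
    let name := pvNameOf a
    if PySem.Str.isIn p name then
      if archs.any (fun arch => PySem.Str.isIn arch name) then some a
      else pvGo p archs rest (if fallback.isNone then some a else fallback)
    else pvGo p archs rest fallback

def find_asset_alt (assets : List (List (String × String))) (platform_keyword : String) (arch_candidates : List String) : Option (List (String × String)) :=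
  let p := PySem.Str.lower platform_keyword
  let archs := arch_candidates.map PySem.Str.lower
  pvGo p archs assets none

-- ===== PRECONDITION & SPEC =====
def Spec_find_asset (assets : List (List (String × String))) (platform_keyword : String) (arch_candidates : List String) (out : Option (List (String × String))) : Prop := out = find_asset_alt assets platform_keyword arch_candidates
instance (assets : List (List (String × String))) (platform_keyword : String) (arch_candidates : List String) (out : Option (List (String × String))) : Decidable (Spec_find_asset assets platform_keyword arch_candidates out) := by unfold Spec_find_asset; infer_instance

-- ===== CLAIM (what is proved, stated in full; the proofs are below) =====
def Claim_equal_find_asset : Prop := ∀ (assets : List (List (String × String))) (platform_keyword : String) (arch_candidates : List String), Dom_find_asset assets platform_keyword arch_candidates → Spec_find_asset assets platform_keyword arch_candidates (find_asset assets platform_keyword arch_candidates)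

-- ===== LEMMAS AND PROOFS =====

-- priority chain: first x, else y, else z (proof-only helper)
def pvChain {α : Type} (x y z : Option α) : Option α :=
  match x with
  | some a => some a
  | none => match y with
    | some a => some a
    | none => z

-- the one-pass loop equals: first combined match, else the fallback, else the first platform-only match
theorem pvGo_eq (p : String) (archs : List String) (assets : List (List (String × String)))
    (fallback : Option (List (String × String))) :
    pvGo p archs assets fallback =
      pvChain
        (assets.find? (fun a =>
          let name := pvNameOf a
          PySem.Str.isIn p name && archs.any (fun arch => PySem.Str.isIn arch name)))
        fallback
        (assets.find? (fun a => PySem.Str.isIn p (pvNameOf a))) := by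
  induction assets generalizing fallback with
  | nil => cases fallback <;> rfl
  | cons a rest ih =>
    by_cases hp : PySem.Str.isIn p (pvNameOf a) = true
    · by_cases ha : archs.any (fun arch => PySem.Str.isIn arch (pvNameOf a)) = true
      · have hAB : List.find? (fun a =>
            let name := pvNameOf a
            PySem.Str.isIn p name && archs.any (fun arch => PySem.Str.isIn arch name)) (a :: rest)
            = some a :=
          List.find?_cons_of_pos (by simp only [Bool.and_eq_true]; exact ⟨hp, ha⟩)
        show (if PySem.Str.isIn p (pvNameOf a) = true then _ else _) = _
        rw [if_pos hp, if_pos ha, hAB]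
        rfl
      · have hAB : List.find? (fun a =>
            let name := pvNameOf a
            PySem.Str.isIn p name && archs.any (fun arch => PySem.Str.isIn arch name)) (a :: rest)
            = List.find? (fun a =>
            let name := pvNameOf a
            PySem.Str.isIn p name && archs.any (fun arch => PySem.Str.isIn arch name)) rest :=
          List.find?_cons_of_neg (by simp only [Bool.and_eq_true, not_and]; exact fun _ => ha)
        have hP : List.find? (fun a => PySem.Str.isIn p (pvNameOf a)) (a :: rest) = some a :=
          List.find?_cons_of_pos hp
        show (if PySem.Str.isIn p (pvNameOf a) = true then _ else _) = _
        rw [if_pos hp, if_neg ha, ih, hAB, hP]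
        cases hx : rest.find? (fun a =>
            let name := pvNameOf a
            PySem.Str.isIn p name && archs.any (fun arch => PySem.Str.isIn arch name)) <;>
          cases fallback <;> rfl
    · have hAB : List.find? (fun a =>
          let name := pvNameOf a
          PySem.Str.isIn p name && archs.any (fun arch => PySem.Str.isIn arch name)) (a :: rest)
          = List.find? (fun a =>
          let name := pvNameOf a
          PySem.Str.isIn p name && archs.any (fun arch => PySem.Str.isIn arch name)) rest :=
        List.find?_cons_of_neg (by simp only [Bool.and_eq_true, not_and]; exact fun h => absurd h hp)
      have hP : List.find? (fun a => PySem.Str.isIn p (pvNameOf a)) (a :: rest)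
          = List.find? (fun a => PySem.Str.isIn p (pvNameOf a)) rest :=
        List.find?_cons_of_neg hp
      show (if PySem.Str.isIn p (pvNameOf a) = true then _ else _) = _
      rw [if_neg hp, ih, hAB, hP]

-- ===== VERDICT (by name: the statement is the Claim_ definition above) =====
theorem find_asset_spec : Claim_equal_find_asset := by
  intro assets platform_keyword arch_candidates _
  unfold Spec_find_asset
  simp only [find_asset, find_asset_alt]
  rw [pvGo_eq]
  cases hX : List.find? (fun a =>
      let name := pvNameOf a
      PySem.Str.isIn (PySem.Str.lower platform_keyword) name &&
        (List.map PySem.Str.lower arch_candidates).any fun arch => PySem.Str.isIn arch name) assets <;>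
    cases hY : List.find? (fun a => PySem.Str.isIn (PySem.Str.lower platform_keyword) (pvNameOf a)) assets <;>
    rfl
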